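-- pv_equiv track=rewrite | github.com/meghanvoneill/CS5340 | program1/Entities/entities.py | interpret_feature_types
-- ===== SOURCE A (Python) =====
-- def interpret_feature_types(feature_types):
--
--     features = [0] * 6
--
--     for f in feature_types:
--         if f == 'WORD':
--             features[0] = 1
--         elif f == 'POS':
--             features[1] = 1
--         elif f == 'ABBR':
--             features[2] = 1
--         elif f == 'CAP':
--             features[3] = 1
--         elif f == 'WORDCON':
--             features[4] = 1
--         elif f == 'POSCON':
--             features[5] = 1
--
--     return features
-- ===== SOURCE B (Python) =====
-- LABELS = ['WORD', 'POS', 'ABBR', 'CAP', 'WORDCON', 'POSCON']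
--
-- def interpret_feature_types(feature_types):
--     return [1 if name in feature_types else 0 for name in LABELS]
-- ===== Notes on version B (the rewrite author's own statement) =====
-- stated objective: idiomatic
-- what changed: Instead of one pass over the input dispatching through an if-elif chain that mutates a flag list, B iterates over the fixed ordered label list and emits 1/0 by membership in the input.
import Mathlib
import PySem

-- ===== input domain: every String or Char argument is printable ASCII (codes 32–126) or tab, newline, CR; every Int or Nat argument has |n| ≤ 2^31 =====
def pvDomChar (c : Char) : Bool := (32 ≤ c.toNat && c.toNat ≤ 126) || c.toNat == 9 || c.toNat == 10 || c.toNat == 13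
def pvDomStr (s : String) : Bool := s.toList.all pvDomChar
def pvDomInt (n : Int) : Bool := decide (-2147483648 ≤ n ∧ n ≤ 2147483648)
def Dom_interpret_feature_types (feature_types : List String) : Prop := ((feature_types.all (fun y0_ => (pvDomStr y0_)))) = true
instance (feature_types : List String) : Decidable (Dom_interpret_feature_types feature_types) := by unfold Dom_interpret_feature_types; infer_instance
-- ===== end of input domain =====

-- ===== PORT A =====
-- A: one pass over the input, setting flags in a 6-slot list via an if-elif chain.
def interpret_feature_types (feature_types : List String) : List Int :=
  feature_types.foldl (fun features f =>
    if f = "WORD" then features.set 0 1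
    else if f = "POS" then features.set 1 1
    else if f = "ABBR" then features.set 2 1
    else if f = "CAP" then features.set 3 1
    else if f = "WORDCON" then features.set 4 1
    else if f = "POSCON" then features.set 5 1
    else features) [0, 0, 0, 0, 0, 0]

-- ===== PORT B =====
-- B: iterate over the fixed label list, testing membership in the input (idiomatic decomposition).
def pvLabels : List String := ["WORD", "POS", "ABBR", "CAP", "WORDCON", "POSCON"]

def interpret_feature_types_alt (feature_types : List String) : List Int :=
  pvLabels.map (fun name => if name ∈ feature_types then 1 else 0)

-- ===== PRECONDITION & SPEC =====
def Spec_interpret_feature_types (feature_types : List String) (out : List Int) : Prop := out = interpret_feature_types_alt feature_types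
instance (feature_types : List String) (out : List Int) : Decidable (Spec_interpret_feature_types feature_types out) := by unfold Spec_interpret_feature_types; infer_instance

-- ===== CLAIM (what is proved, stated in full; the proofs are below) =====
def Claim_equal_interpret_feature_types : Prop := ∀ (feature_types : List String), Dom_interpret_feature_types feature_types → Spec_interpret_feature_types feature_types (interpret_feature_types feature_types)

-- ===== LEMMAS AND PROOFS =====

-- Invariant of A's loop: starting from any 6-slot state, the fold ends with slot i
-- equal to 1 if label i occurs in the remaining input, else the starting value.
theorem interpret_feature_types_loop (fs : List String) (a b c d e g : Int) :
    fs.foldl (fun features f =>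
      if f = "WORD" then features.set 0 1
      else if f = "POS" then features.set 1 1
      else if f = "ABBR" then features.set 2 1
      else if f = "CAP" then features.set 3 1
      else if f = "WORDCON" then features.set 4 1
      else if f = "POSCON" then features.set 5 1
      else features) [a, b, c, d, e, g] =
    [if "WORD" ∈ fs then 1 else a,
     if "POS" ∈ fs then 1 else b,
     if "ABBR" ∈ fs then 1 else c,
     if "CAP" ∈ fs then 1 else d,
     if "WORDCON" ∈ fs then 1 else e,
     if "POSCON" ∈ fs then 1 else g] := by
  induction fs generalizing a b c d e g with
  | nil => simp
  | cons f t ih =>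
    simp only [List.foldl_cons]
    by_cases h1 : f = "WORD"
    · subst h1; rw [if_pos rfl]
      show List.foldl _ [1, b, c, d, e, g] t = _
      rw [ih]; simp
    by_cases h2 : f = "POS"
    · subst h2; rw [if_neg (by decide), if_pos rfl]
      show List.foldl _ [a, 1, c, d, e, g] t = _
      rw [ih]; simp
    by_cases h3 : f = "ABBR"
    · subst h3; rw [if_neg (by decide), if_neg (by decide), if_pos rfl]
      show List.foldl _ [a, b, 1, d, e, g] t = _
      rw [ih]; simp
    by_cases h4 : f = "CAP"
    · subst h4; rw [if_neg (by decide), if_neg (by decide), if_neg (by decide), if_pos rfl]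
      show List.foldl _ [a, b, c, 1, e, g] t = _
      rw [ih]; simp
    by_cases h5 : f = "WORDCON"
    · subst h5; rw [if_neg (by decide), if_neg (by decide), if_neg (by decide), if_neg (by decide), if_pos rfl]
      show List.foldl _ [a, b, c, d, 1, g] t = _
      rw [ih]; simp
    by_cases h6 : f = "POSCON"
    · subst h6; rw [if_neg (by decide), if_neg (by decide), if_neg (by decide), if_neg (by decide), if_neg (by decide), if_pos rfl]
      show List.foldl _ [a, b, c, d, e, 1] t = _
      rw [ih]; simp
    · rw [if_neg h1, if_neg h2, if_neg h3, if_neg h4, if_neg h5, if_neg h6, ih]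
      simp [List.mem_cons, Ne.symm h1, Ne.symm h2, Ne.symm h3, Ne.symm h4, Ne.symm h5, Ne.symm h6]

-- ===== VERDICT (by name: the statement is the Claim_ definition above) =====
theorem interpret_feature_types_spec : Claim_equal_interpret_feature_types := by
  intro fs _
  show _ = _
  rw [interpret_feature_types, interpret_feature_types_loop]
  simp [interpret_feature_types_alt, pvLabels]
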